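-- pv_equiv track=rewrite | github.com/ryotambara/Soccer-Market-Value | pipeline/clean_bundesliga.py | map_nationality
-- ===== SOURCE A (Python) =====
-- AFRICAN_NATIONS = {
--     "Senegal", "Nigeria", "Ghana", "Ivory Coast", "Cameroon", "Egypt",
--     "Algeria", "Morocco", "Tunisia", "Mali", "Guinea",
--     "Democratic Republic of Congo", "Congo DR", "Gabon", "South Africa",
--     "Sierra Leone", "Benin", "Burkina Faso", "Ethiopia", "Kenya",
--     "Tanzania", "Uganda", "Zimbabwe", "Zambia", "Angola", "Cape Verde",
--     "Gambia", "Guinea-Bissau", "Liberia", "Mozambique", "Namibia",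
--     "Sudan", "Togo",
-- }
--
-- ASIAN_NATIONS = {
--     "Japan", "South Korea", "China", "Iran", "Saudi Arabia", "Qatar",
--     "United Arab Emirates", "Iraq", "Syria", "Lebanon", "Jordan",
--     "Indonesia", "Australia", "Thailand", "Vietnam", "India", "Pakistan",
--     "Uzbekistan", "Kazakhstan", "Israel",
-- }
--
-- SOUTH_AMERICAN_OTHER = {
--     "Colombia", "Chile", "Peru", "Ecuador", "Uruguay", "Venezuela",
--     "Paraguay", "Bolivia",
-- }
--
-- def map_nationality(nat: str) -> str:
--     if not isinstance(nat, str) or nat.strip() == "":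
--         return "other_europe"
--     nat = nat.strip()
--     nat_lower = nat.lower()
--     if nat_lower in ("brazil", "brasil"):
--         return "brazilian"
--     if nat_lower == "france":
--         return "french"
--     if nat_lower in ("england", "united kingdom", "british"):
--         return "english"
--     if nat_lower in ("spain", "españa"):
--         return "spanish"
--     if nat_lower in ("germany", "deutschland"):
--         return "german"
--     if nat_lower == "argentina":
--         return "argentinian"
--     if nat_lower == "portugal":
--         return "portuguese"
--     if nat in AFRICAN_NATIONS or nat_lower in {n.lower() for n in AFRICAN_NATIONS}:
--         return "african"
--     if nat in ASIAN_NATIONS or nat_lower in {n.lower() for n in ASIAN_NATIONS}: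
--         return "asian"
--     if nat in SOUTH_AMERICAN_OTHER or nat_lower in {n.lower() for n in SOUTH_AMERICAN_OTHER}:
--         return "south_american_other"
--     return "other_europe"
-- ===== SOURCE B (Python) =====
-- # B: one precomputed lowercase->label dict replaces A's chain of comparisons and set scans (single lookup; 'other_europe' default).
-- AFRICAN_NATIONS = {
--     "Senegal", "Nigeria", "Ghana", "Ivory Coast", "Cameroon", "Egypt",
--     "Algeria", "Morocco", "Tunisia", "Mali", "Guinea",
--     "Democratic Republic of Congo", "Congo DR", "Gabon", "South Africa",
--     "Sierra Leone", "Benin", "Burkina Faso", "Ethiopia", "Kenya",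
--     "Tanzania", "Uganda", "Zimbabwe", "Zambia", "Angola", "Cape Verde",
--     "Gambia", "Guinea-Bissau", "Liberia", "Mozambique", "Namibia",
--     "Sudan", "Togo",
-- }
--
-- ASIAN_NATIONS = {
--     "Japan", "South Korea", "China", "Iran", "Saudi Arabia", "Qatar",
--     "United Arab Emirates", "Iraq", "Syria", "Lebanon", "Jordan",
--     "Indonesia", "Australia", "Thailand", "Vietnam", "India", "Pakistan",
--     "Uzbekistan", "Kazakhstan", "Israel",
-- }
--
-- SOUTH_AMERICAN_OTHER = {
--     "Colombia", "Chile", "Peru", "Ecuador", "Uruguay", "Venezuela",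
--     "Paraguay", "Bolivia",
-- }
--
-- LOOKUP = {
--     "brazil": "brazilian", "brasil": "brazilian",
--     "france": "french",
--     "england": "english", "united kingdom": "english", "british": "english",
--     "spain": "spanish", "españa": "spanish",
--     "germany": "german", "deutschland": "german",
--     "argentina": "argentinian",
--     "portugal": "portuguese",
-- }
-- for _nations, _label in ((AFRICAN_NATIONS, "african"),
--                          (ASIAN_NATIONS, "asian"),
--                          (SOUTH_AMERICAN_OTHER, "south_american_other")):
--     for _n in _nations:
--         LOOKUP[_n.lower()] = _label
--
--
-- def map_nationality(nat: str) -> str: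
--     if not isinstance(nat, str) or nat.strip() == "":
--         return "other_europe"
--     return LOOKUP.get(nat.strip().lower(), "other_europe")
-- ===== Notes on version B (the rewrite author's own statement) =====
-- stated objective: idiomatic
-- what changed: Replaces the sequential if-chain of tuple comparisons and per-call set comprehensions with one module-level precomputed dict from lowercased nation to label, so the function body collapses to a strip/lower plus a single LOOKUP.get with the 'other_europe' default.
import Mathlib
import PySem

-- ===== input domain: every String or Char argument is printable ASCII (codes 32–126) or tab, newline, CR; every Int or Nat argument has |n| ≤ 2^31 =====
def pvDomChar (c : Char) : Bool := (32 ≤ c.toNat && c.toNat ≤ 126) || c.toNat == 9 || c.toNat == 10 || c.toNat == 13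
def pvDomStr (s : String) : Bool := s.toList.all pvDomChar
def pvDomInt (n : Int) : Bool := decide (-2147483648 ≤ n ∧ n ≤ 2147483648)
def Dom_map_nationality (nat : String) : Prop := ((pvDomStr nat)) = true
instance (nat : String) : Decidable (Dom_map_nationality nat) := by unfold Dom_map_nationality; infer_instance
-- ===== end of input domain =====

-- B precomputes one lowercase->label dict, so the function is guard + a single lookup with
-- default, instead of A's if-chain of comparisons and per-call set scans (idiomatic rewrite).

-- ===== PORT A =====
-- Python sets of string literals; membership-only use, ported as PySem.Set (all literals distinct).
def africanNations : PySem.Set String :=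
  ["Senegal", "Nigeria", "Ghana", "Ivory Coast", "Cameroon", "Egypt",
   "Algeria", "Morocco", "Tunisia", "Mali", "Guinea",
   "Democratic Republic of Congo", "Congo DR", "Gabon", "South Africa",
   "Sierra Leone", "Benin", "Burkina Faso", "Ethiopia", "Kenya",
   "Tanzania", "Uganda", "Zimbabwe", "Zambia", "Angola", "Cape Verde",
   "Gambia", "Guinea-Bissau", "Liberia", "Mozambique", "Namibia",
   "Sudan", "Togo"]

def asianNations : PySem.Set String :=
  ["Japan", "South Korea", "China", "Iran", "Saudi Arabia", "Qatar",
   "United Arab Emirates", "Iraq", "Syria", "Lebanon", "Jordan",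
   "Indonesia", "Australia", "Thailand", "Vietnam", "India", "Pakistan",
   "Uzbekistan", "Kazakhstan", "Israel"]

def southAmericanOther : PySem.Set String :=
  ["Colombia", "Chile", "Peru", "Ecuador", "Uruguay", "Venezuela",
   "Paraguay", "Bolivia"]

def map_nationality (nat : String) : String :=
  if PySem.Str.strip nat == "" then "other_europe"
  else
    let t := PySem.Str.strip nat
    let l := PySem.Str.lower t
    if l == "brazil" || l == "brasil" then "brazilian"
    else if l == "france" then "french"
    else if l == "england" || l == "united kingdom" || l == "british" then "english"
    else if l == "spain" || l == "españa" then "spanish"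
    else if l == "germany" || l == "deutschland" then "german"
    else if l == "argentina" then "argentinian"
    else if l == "portugal" then "portuguese"
    else if PySem.Set.contains africanNations t
            || PySem.Set.contains (PySem.Set.ofList (africanNations.map PySem.Str.lower)) l then "african"
    else if PySem.Set.contains asianNations t
            || PySem.Set.contains (PySem.Set.ofList (asianNations.map PySem.Str.lower)) l then "asian"
    else if PySem.Set.contains southAmericanOther t
            || PySem.Set.contains (PySem.Set.ofList (southAmericanOther.map PySem.Str.lower)) l then "south_american_other"
    else "other_europe"

-- ===== PORT B =====
-- The Python dict literal plus the three fill loops over the sets; every key is distinct, so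
-- the built dict's items are exactly this concatenation (in insertion order, set order moot).
def lookupTable : PySem.Dict String String :=
  PySem.Dict.mk
    ([("brazil", "brazilian"), ("brasil", "brazilian"),
      ("france", "french"),
      ("england", "english"), ("united kingdom", "english"), ("british", "english"),
      ("spain", "spanish"), ("españa", "spanish"),
      ("germany", "german"), ("deutschland", "german"),
      ("argentina", "argentinian"),
      ("portugal", "portuguese")]
     ++ africanNations.map (fun n => (PySem.Str.lower n, "african"))
     ++ asianNations.map (fun n => (PySem.Str.lower n, "asian"))
     ++ southAmericanOther.map (fun n => (PySem.Str.lower n, "south_american_other")))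

def map_nationality_alt (nat : String) : String :=
  if PySem.Str.strip nat == "" then "other_europe"
  else PySem.Dict.getD lookupTable (PySem.Str.lower (PySem.Str.strip nat)) "other_europe"

-- ===== PRECONDITION & SPEC =====
def Spec_map_nationality (nat : String) (out : String) : Prop := out = map_nationality_alt nat
instance (nat : String) (out : String) : Decidable (Spec_map_nationality nat out) := by unfold Spec_map_nationality; infer_instance

-- ===== CLAIM (what is proved, stated in full; the proofs are below) =====
def Claim_equal_map_nationality : Prop := ∀ (nat : String), Dom_map_nationality nat → Spec_map_nationality nat (map_nationality nat)

-- ===== LEMMAS AND PROOFS =====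

-- getD on a literal cons cell is one comparison then the tail lookup.
theorem getD_mk_cons' (k v l d : String) (rest : List (String × String)) :
    PySem.Dict.getD (PySem.Dict.mk ((k,v)::rest)) l d
    = if l = k then v else PySem.Dict.getD (PySem.Dict.mk rest) l d := by
  rw [PySem.Dict.getD_eq_get?_getD, PySem.Dict.get?_mk_cons]
  by_cases h : k = l
  · subst h; simp
  · have hb : (k == l) = false := by simp [h]
    have hb' : ¬ (l = k) := fun hl => h hl.symm
    simp [hb, hb', ← PySem.Dict.getD_eq_get?_getD]

-- lookup across a constant-value segment of the table is a membership test on its keys.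
theorem getD_segment (ks : List String) (v d l : String) (rest : List (String × String)) :
    PySem.Dict.getD (PySem.Dict.mk (ks.map (fun k => (k, v)) ++ rest)) l d
    = if l ∈ ks then v else PySem.Dict.getD (PySem.Dict.mk rest) l d := by
  induction ks with
  | nil => simp
  | cons k ks ih =>
      simp only [List.map_cons, List.cons_append, getD_mk_cons', ih, List.mem_cons]
      by_cases h : l = k <;> simp [h]

-- If t is in a capitalized set then lower t is in the lowered set, so A's two-sided
-- membership test collapses to the lowered one.
theorem absorb_mem (S : PySem.Set String) (t : String)
    (h : ∀ x ∈ S, PySem.Str.lower x ∈ (S.map PySem.Str.lower : List String)) :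
    (PySem.Set.contains S t
      || PySem.Set.contains (PySem.Set.ofList (S.map PySem.Str.lower)) (PySem.Str.lower t))
    = PySem.Set.contains (PySem.Set.ofList (S.map PySem.Str.lower)) (PySem.Str.lower t) := by
  cases hc : PySem.Set.contains S t
  · simp
  · have ht : t ∈ S := by simpa [PySem.Set.contains] using hc
    simp [pysem, h t ht]

-- A's if-chain on the lowered key equals one lookup in lookupTable, for every key.
set_option maxHeartbeats 2000000 in
theorem key_lemma (l : String) :
    (if l == "brazil" || l == "brasil" then "brazilian"
    else if l == "france" then "french"
    else if l == "england" || l == "united kingdom" || l == "british" then "english"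
    else if l == "spain" || l == "españa" then "spanish"
    else if l == "germany" || l == "deutschland" then "german"
    else if l == "argentina" then "argentinian"
    else if l == "portugal" then "portuguese"
    else if PySem.Set.contains (PySem.Set.ofList (africanNations.map PySem.Str.lower)) l then "african"
    else if PySem.Set.contains (PySem.Set.ofList (asianNations.map PySem.Str.lower)) l then "asian"
    else if PySem.Set.contains (PySem.Set.ofList (southAmericanOther.map PySem.Str.lower)) l then "south_american_other"
    else "other_europe")
    = PySem.Dict.getD lookupTable l "other_europe" := by
  unfold lookupTable
  simp only [List.cons_append, List.nil_append, List.append_assoc]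
  simp only [getD_mk_cons']
  have h1 : List.map (fun n => (PySem.Str.lower n, "african")) africanNations
      = List.map (fun k => (k, "african")) (africanNations.map PySem.Str.lower) := by
    simp [List.map_map, Function.comp_def]
  have h2 : List.map (fun n => (PySem.Str.lower n, "asian")) asianNations
      = List.map (fun k => (k, "asian")) (asianNations.map PySem.Str.lower) := by
    simp [List.map_map, Function.comp_def]
  have h3 : List.map (fun n => (PySem.Str.lower n, "south_american_other")) southAmericanOther
      = List.map (fun k => (k, "south_american_other")) (southAmericanOther.map PySem.Str.lower)
        ++ ([] : List (String × String)) := by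
    simp [List.map_map, Function.comp_def]
  rw [h1, h2, h3, getD_segment, getD_segment, getD_segment]
  have hc : ∀ (xs : List String) (x : String),
      (PySem.Set.contains (PySem.Set.ofList xs) x = true) = (x ∈ xs) := by
    intro xs x; simp [pysem]
  simp only [hc, Bool.or_eq_true, beq_iff_eq]
  by_cases hk : l ∈ (["brazil", "brasil", "france", "england", "united kingdom", "british",
      "spain", "españa", "germany", "deutschland", "argentina", "portugal"]
      ++ africanNations.map PySem.Str.lower ++ asianNations.map PySem.Str.lower
      ++ southAmericanOther.map PySem.Str.lower)
  · fin_cases hk <;> rfl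
  · simp only [List.mem_append, List.mem_cons, List.not_mem_nil, not_or, or_false] at hk
    obtain ⟨⟨⟨⟨h1,h2,h3,h4,h5,h6,h7,h8,h9,h10,h11,h12⟩,hA⟩,hAs⟩,hS⟩ := hk
    simp [h1,h2,h3,h4,h5,h6,h7,h8,h9,h10,h11,h12,hA,hAs,hS]
    rfl

-- ===== VERDICT (by name: the statement is the Claim_ definition above) =====
theorem map_nationality_spec : Claim_equal_map_nationality := by
  intro nat _
  unfold Spec_map_nationality
  cases hb : PySem.Str.strip nat == ""
  · simp only [map_nationality, map_nationality_alt, hb, Bool.false_eq_true, if_false]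
    rw [absorb_mem africanNations _ (by decide), absorb_mem asianNations _ (by decide),
        absorb_mem southAmericanOther _ (by decide)]
    exact key_lemma _
  · simp [map_nationality, map_nationality_alt, hb]
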